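-- pv_equiv track=rewrite | github.com/Erudite-jay/password-validator | main.py | checkThreeSpecialCharacter
-- ===== SOURCE A (Python) =====
-- def checkThreeSpecialCharacter(password):
--     countSpecialCharacters = 0
--     for char in password:
--         if char in "!@#$%^&*()_-~":
--             countSpecialCharacters = countSpecialCharacters + 1
--     if countSpecialCharacters >= 3:
--         return True
--     return False
-- ===== SOURCE B (Python) =====
-- def checkThreeSpecialCharacter(password):
--     # Build a frequency table of the password once, then sum counts over
--     # the fixed special-character set (reversed traversal vs A).
--     counts = {}
--     for ch in password:
--         counts[ch] = counts.get(ch, 0) + 1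
--     total = 0
--     for c in "!@#$%^&*()_-~":
--         total += counts.get(c, 0)
--     return total >= 3
-- ===== Notes on version B (the rewrite author's own statement) =====
-- stated objective: alternative
-- what changed: B builds a character-frequency dict of the password in one pass and then sums the counts of the 13 fixed special characters, instead of testing each password character for membership in the special string.
import Mathlib
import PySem

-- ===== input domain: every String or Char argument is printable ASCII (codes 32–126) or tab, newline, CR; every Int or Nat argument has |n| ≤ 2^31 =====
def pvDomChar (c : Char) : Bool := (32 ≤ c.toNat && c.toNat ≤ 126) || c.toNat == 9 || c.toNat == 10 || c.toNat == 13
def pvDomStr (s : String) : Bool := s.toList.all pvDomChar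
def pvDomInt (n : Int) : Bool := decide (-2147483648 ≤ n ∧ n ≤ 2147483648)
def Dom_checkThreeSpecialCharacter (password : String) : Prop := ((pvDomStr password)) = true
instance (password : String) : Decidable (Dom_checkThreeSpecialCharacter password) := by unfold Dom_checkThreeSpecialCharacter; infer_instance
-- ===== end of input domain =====

-- B builds a frequency dict of the password once, then sums the counts of the fixed special characters (alternative traversal, same cost class).

-- ===== PORT A =====
def checkThreeSpecialCharacter (password : String) : Bool :=
  let cnt : Int := password.toList.foldl
    (fun acc ch => if "!@#$%^&*()_-~".toList.contains ch then acc + 1 else acc) 0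
  if cnt ≥ 3 then true else false

-- ===== PORT B =====
def checkThreeSpecialCharacter_alt (password : String) : Bool :=
  let counts : PySem.Dict Char Int := password.toList.foldl
    (fun d ch => d.insert ch (d.getD ch 0 + 1)) PySem.Dict.empty
  let total : Int := "!@#$%^&*()_-~".toList.foldl
    (fun t c => t + counts.getD c 0) 0
  decide (total ≥ 3)

-- ===== PRECONDITION & SPEC =====
def Spec_checkThreeSpecialCharacter (password : String) (out : Bool) : Prop := out = checkThreeSpecialCharacter_alt password
instance (password : String) (out : Bool) : Decidable (Spec_checkThreeSpecialCharacter password out) := by unfold Spec_checkThreeSpecialCharacter; infer_instance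

-- ===== CLAIM (what is proved, stated in full; the proofs are below) =====
def Claim_equal_checkThreeSpecialCharacter : Prop := ∀ (password : String), Dom_checkThreeSpecialCharacter password → Spec_checkThreeSpecialCharacter password (checkThreeSpecialCharacter password)

-- ===== LEMMAS AND PROOFS =====

-- sum of the per-character indicator over a duplicate-free list = membership indicator
theorem sum_indicator_nodup (sp : List Char) (h : sp.Nodup) (x : Char) :
    (sp.map (fun c => if c == x then (1 : Int) else 0)).sum
      = (if sp.contains x then (1 : Int) else 0) := by
  induction sp with
  | nil => simp
  | cons a t ih =>
      rcases List.nodup_cons.mp h with ⟨ha, ht⟩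
      rw [List.map_cons, List.sum_cons, ih ht]
      by_cases hax : a = x
      · subst hax
        have hz : t.contains a = false := by simpa using ha
        simp [ha]
      · have h1 : (a == x) = false := by simpa using hax
        have h2 : (x == a) = false := by
          simp only [beq_eq_false_iff_ne, ne_eq]
          exact fun e => hax e.symm
        have h3 : ¬ x = a := fun e => hax e.symm
        simp [h1, h3]

-- summing the counter over a duplicate-free list counts the characters that belong to it
theorem sum_counts_eq_countP (sp : List Char) (h : sp.Nodup) (l : List Char) :
    (sp.map (fun c => (l.count c : Int))).sum = (l.countP (fun ch => sp.contains ch) : Int) := by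
  induction l with
  | nil => simp
  | cons x t ih =>
      have hmap : (sp.map (fun c => ((x :: t).count c : Int)))
          = sp.map (fun c => (t.count c : Int) + (if c == x then (1 : Int) else 0)) := by
        apply List.map_congr_left
        intro c _
        by_cases hc : c = x
        · subst hc; simp
        · have hb : (c == x) = false := by simpa using hc
          have hb2 : ¬ x = c := fun e => hc e.symm
          simp [hb, hb2]
      rw [hmap]
      have hsum : (sp.map (fun c => (t.count c : Int) + (if c == x then (1 : Int) else 0))).sum
          = (sp.map (fun c => (t.count c : Int))).sum
            + (sp.map (fun c => if c == x then (1 : Int) else 0)).sum := by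
        induction sp with
        | nil => simp
        | cons a s ihs => simp [List.map_cons, List.sum_cons]; ring
      rw [hsum, ih, sum_indicator_nodup sp h x]
      by_cases hx : sp.contains x
      · simp [List.countP_cons]
      · have hx' : sp.contains x = false := by simpa using hx
        simp [List.countP_cons]

theorem checkThreeSpecialCharacter_eq (password : String) :
    checkThreeSpecialCharacter password = checkThreeSpecialCharacter_alt password := by
  unfold checkThreeSpecialCharacter checkThreeSpecialCharacter_alt
  simp only [ge_iff_le]
  rw [PySem.Dict.foldl_insert_getD_add_one_eq_counter]
  rw [PySem.List.foldl_add ("!@#$%^&*()_-~".toList) (fun c => (PySem.Dict.counter password.toList).getD c 0) 0]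
  have hmap : ("!@#$%^&*()_-~".toList.map (fun c => (PySem.Dict.counter password.toList).getD c 0))
      = "!@#$%^&*()_-~".toList.map (fun c => (password.toList.count c : Int)) := by
    apply List.map_congr_left
    intro c _
    exact PySem.Dict.getD_counter password.toList c
  rw [hmap, sum_counts_eq_countP _ (by decide) password.toList]
  rw [PySem.List.foldl_if_add_one (fun ch => "!@#$%^&*()_-~".toList.contains ch)]
  rw [zero_add]
  by_cases h3 : (3 : Int) ≤ (password.toList.countP (fun ch => "!@#$%^&*()_-~".toList.contains ch) : Int)
  · simp [h3]
  · simp [h3]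

-- ===== VERDICT (by name: the statement is the Claim_ definition above) =====
theorem checkThreeSpecialCharacter_spec : Claim_equal_checkThreeSpecialCharacter := by
  intro password _
  unfold Spec_checkThreeSpecialCharacter
  exact checkThreeSpecialCharacter_eq password
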